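-- pv_equiv track=rewrite | github.com/JimmyWangJimmy/x-growth-operator | scripts/common.py | mission_focus_terms
-- ===== SOURCE A (Python) =====
-- from typing import Any
--
-- def normalize_text(value: str) -> str:
--     return " ".join((value or "").strip().split())
--
-- def mission_focus_terms(mission: dict[str, Any], limit: int = 8) -> list[str]:
--     phrases: list[str] = []
--     for field in ("primary_topics", "watch_keywords", "audience"):
--         value = mission.get(field, [])
--         if isinstance(value, list):
--             phrases.extend(normalize_text(str(item)) for item in value if normalize_text(str(item)))
--
--     seen: set[str] = set()
--     ordered: list[str] = []
--     for phrase in phrases: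
--         lowered = phrase.lower()
--         if lowered in seen:
--             continue
--         seen.add(lowered)
--         ordered.append(phrase)
--         if len(ordered) >= limit:
--             break
--     return ordered
-- ===== SOURCE B (Python) =====
-- from typing import Any
--
-- def normalize_text(value: str) -> str:
--     return " ".join((value or "").strip().split())
--
-- def mission_focus_terms(mission: dict[str, Any], limit: int = 8) -> list[str]:
--     seen: set[str] = set()
--     ordered: list[str] = []
--     for field in ("primary_topics", "watch_keywords", "audience"):
--         value = mission.get(field, [])
--         if not isinstance(value, list):
--             continue
--         for item in value:
--             phrase = normalize_text(str(item))
--             if not phrase: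
--                 continue
--             lowered = phrase.lower()
--             if lowered in seen:
--                 continue
--             seen.add(lowered)
--             ordered.append(phrase)
--             if len(ordered) >= limit:
--                 return ordered
--     return ordered
-- ===== Notes on version B (the rewrite author's own statement) =====
-- stated objective: simpler
-- what changed: B fuses A's two sequential passes (build the full normalized-phrase list, then dedup/limit it) into one streaming pass that normalizes, dedups and truncates as it walks the three fields, returning as soon as the limit is reached without ever materialising the intermediate phrase list.
import Mathlib
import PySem

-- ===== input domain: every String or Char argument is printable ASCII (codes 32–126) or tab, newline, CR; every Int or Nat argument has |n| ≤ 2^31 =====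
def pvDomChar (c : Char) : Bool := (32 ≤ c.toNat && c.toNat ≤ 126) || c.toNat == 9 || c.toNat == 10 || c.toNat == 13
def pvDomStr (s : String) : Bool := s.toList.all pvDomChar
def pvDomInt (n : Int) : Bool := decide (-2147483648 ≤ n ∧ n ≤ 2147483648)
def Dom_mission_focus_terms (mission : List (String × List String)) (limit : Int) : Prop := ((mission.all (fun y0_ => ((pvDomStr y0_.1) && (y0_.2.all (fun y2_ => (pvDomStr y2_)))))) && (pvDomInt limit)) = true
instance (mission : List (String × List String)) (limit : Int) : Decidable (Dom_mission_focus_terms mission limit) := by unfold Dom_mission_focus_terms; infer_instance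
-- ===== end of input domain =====

-- B fuses A's two sequential passes (collect phrases, then dedup/limit) into one streaming
-- pass over the three fields that dedups and stops at the limit directly (objective: simpler).


-- ===== PORT A =====
-- normalize_text: " ".join(value.strip().split())
def normalize_text (value : String) : String :=
  PySem.Str.join " " (PySem.Str.split₀ (PySem.Str.strip value))

-- second loop of A: for phrase in phrases: dedup, append, break at limit
def pvLoopA (limit : Int) : List String → PySem.Set String → List String → List String
  | [], _, ordered => ordered
  | phrase :: rest, seen, ordered =>
    let lowered := PySem.Str.lower phrase
    if PySem.Set.contains seen lowered then
      pvLoopA limit rest seen ordered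
    else
      let seen := PySem.Set.add seen lowered
      let ordered := ordered ++ [phrase]
      if (ordered.length : Int) ≥ limit then ordered
      else pvLoopA limit rest seen ordered

def mission_focus_terms (mission : List (String × List String)) (limit : Int) : List String :=
  let phrases :=
    ["primary_topics", "watch_keywords", "audience"].foldl
      (fun acc field =>
        let value := PySem.Dict.getD (PySem.Dict.mk mission) field []
        acc ++ value.filterMap (fun item =>
          let n := normalize_text item
          if n = "" then none else some n)) []
  pvLoopA limit phrases (PySem.Set.empty) []

-- ===== PORT B =====
-- inner loop of B over one field's items; Bool flag = "returned early"
def pvAltInner (limit : Int) : List String → PySem.Set String → List String →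
    PySem.Set String × List String × Bool
  | [], seen, ordered => (seen, ordered, false)
  | item :: rest, seen, ordered =>
    let phrase := normalize_text item
    if phrase = "" then pvAltInner limit rest seen ordered
    else
      let lowered := PySem.Str.lower phrase
      if PySem.Set.contains seen lowered then pvAltInner limit rest seen ordered
      else
        let seen := PySem.Set.add seen lowered
        let ordered := ordered ++ [phrase]
        if (ordered.length : Int) ≥ limit then (seen, ordered, true)
        else pvAltInner limit rest seen ordered

-- outer loop of B over the three fields
def pvAltOuter (mission : List (String × List String)) (limit : Int) :
    List String → PySem.Set String → List String → List String
  | [], _, ordered => ordered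
  | field :: fields, seen, ordered =>
    let value := PySem.Dict.getD (PySem.Dict.mk mission) field []
    match pvAltInner limit value seen ordered with
    | (_, ordered', true) => ordered'
    | (seen', ordered', false) => pvAltOuter mission limit fields seen' ordered'

def mission_focus_terms_alt (mission : List (String × List String)) (limit : Int) : List String :=
  pvAltOuter mission limit ["primary_topics", "watch_keywords", "audience"] (PySem.Set.empty) []

-- ===== PRECONDITION & SPEC =====
def Spec_mission_focus_terms (mission : List (String × List String)) (limit : Int) (out : List String) : Prop := out = mission_focus_terms_alt mission limit
instance (mission : List (String × List String)) (limit : Int) (out : List String) : Decidable (Spec_mission_focus_terms mission limit out) := by unfold Spec_mission_focus_terms; infer_instance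

-- ===== CLAIM (what is proved, stated in full; the proofs are below) =====
def Claim_equal_mission_focus_terms : Prop := ∀ (mission : List (String × List String)) (limit : Int), Dom_mission_focus_terms mission limit → Spec_mission_focus_terms mission limit (mission_focus_terms mission limit)

-- ===== LEMMAS AND PROOFS =====

-- Running A's dedup loop over one field's normalized phrases followed by ys is the same as
-- B's inner loop over the field, then (if it did not hit the limit) A's loop on ys.
theorem pvLoopA_filterMap (limit : Int) (value ys : List String)
    (seen : PySem.Set String) (ordered : List String) :
    pvLoopA limit
      (value.filterMap (fun item =>
        let n := normalize_text item
        if n = "" then none else some n) ++ ys) seen ordered =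
      (match pvAltInner limit value seen ordered with
       | (_, ordered', true) => ordered'
       | (seen', ordered', false) => pvLoopA limit ys seen' ordered') := by
  induction value generalizing seen ordered with
  | nil => simp [pvAltInner]
  | cons item rest ih =>
    simp only [List.filterMap_cons]
    by_cases hn : normalize_text item = ""
    · simp [pvAltInner, hn, ih]
    · by_cases hs : PySem.Str.lower (normalize_text item) ∈ seen
      · simp [pvLoopA, pvAltInner, hn, hs, ih]
      · by_cases hl : limit ≤ (ordered.length : Int) + 1
        · simp [pvLoopA, pvAltInner, hn, hs, hl]
        · simp [pvLoopA, pvAltInner, hn, hs, hl, ih]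

-- The outer correspondence: A's loop over the concatenated phrases of a field list equals
-- B's outer loop over those fields.
theorem pvLoopA_fields (mission : List (String × List String)) (limit : Int)
    (fields : List String) (seen : PySem.Set String) (ordered : List String) :
    pvLoopA limit
      (fields.flatMap (fun field =>
        (PySem.Dict.getD (PySem.Dict.mk mission) field []).filterMap (fun item =>
          let n := normalize_text item
          if n = "" then none else some n))) seen ordered =
      pvAltOuter mission limit fields seen ordered := by
  induction fields generalizing seen ordered with
  | nil => simp [pvAltOuter, pvLoopA]
  | cons f fs ih =>
    rw [List.flatMap_cons, pvLoopA_filterMap]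
    simp only [pvAltOuter]
    cases h : pvAltInner limit (PySem.Dict.getD (PySem.Dict.mk mission) f []) seen ordered with
    | mk s rest =>
      cases rest with
      | mk o flag => cases flag <;> simp [ih]

-- ===== VERDICT (by name: the statement is the Claim_ definition above) =====
theorem mission_focus_terms_spec : Claim_equal_mission_focus_terms := by
  intro mission limit _
  unfold Spec_mission_focus_terms mission_focus_terms mission_focus_terms_alt
  rw [PySem.List.foldl_append_eq_flatMap]
  simpa using pvLoopA_fields mission limit ["primary_topics", "watch_keywords", "audience"] PySem.Set.empty []
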